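-- pv_equiv track=rewrite | github.com/yoksamutr/grader | 09/09_MoreDC_34.py | pattern6
-- ===== SOURCE A (Python) =====
-- def pattern6(n):
--     res=[[0]*n for _ in range(n)]
--     num=1
--     df=n-2
--     for i in range(n):
--         if i%2==0:
--             for j in range(n):
--                 if i+j==n:
--                     break
--                 res[j][j+i]=num
--                 num+=1
--         else:
--             num+=df
--             temp=num+1
--             for k in range(n):
--                 if i+k==n:
--                     break
--                 res[k][k+i]=num
--                 num-=1
--             num=temp
--             df-=2
--     return res
-- ===== SOURCE B (Python) =====
-- def pattern6(n):
--     # closed-form entry: diagonal i = c - r starts after i*n - i*(i-1)//2 earlier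
--     # cells; even diagonals run top-down, odd diagonals bottom-up.
--     def val(r, c):
--         i = c - r
--         base = i * n - i * (i - 1) // 2
--         pos = r if i % 2 == 0 else n - i - 1 - r
--         return base + pos + 1
--     return [[val(r, c) if c >= r else 0 for c in range(n)] for r in range(n)]
-- ===== Notes on version B (the rewrite author's own statement) =====
-- stated objective: simpler
-- what changed: Replaces A's in-place diagonal-filling loops with their zig-zag counter and df/temp offset bookkeeping by a closed-form per-cell formula (diagonal index i=c-r, base i*n-i*(i-1)//2, position r or n-i-1-r by parity) inside a plain nested comprehension.
import Mathlib
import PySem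

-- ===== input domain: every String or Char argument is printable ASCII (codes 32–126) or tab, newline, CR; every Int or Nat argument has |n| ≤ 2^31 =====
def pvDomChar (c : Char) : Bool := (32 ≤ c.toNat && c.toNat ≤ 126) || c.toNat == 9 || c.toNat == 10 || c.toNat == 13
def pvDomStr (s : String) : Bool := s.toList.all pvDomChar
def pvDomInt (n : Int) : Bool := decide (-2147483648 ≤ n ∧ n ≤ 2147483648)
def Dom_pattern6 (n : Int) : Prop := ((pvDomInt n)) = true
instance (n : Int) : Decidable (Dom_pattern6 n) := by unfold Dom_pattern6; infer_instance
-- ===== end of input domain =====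

-- B replaces A's mutating diagonal loops and offset counter with a closed-form per-cell formula (objective: simpler).

-- ===== PORT A =====
-- res[j][j+i] = v  (both indices are nonnegative and in range wherever A executes this)
def pvSet2 (res : List (List Int)) (r c : Int) (v : Int) : List (List Int) :=
  PySem.List.pySetD res r (PySem.List.pySetD (PySem.List.pyGetD res r []) c v)

-- 'for j in range(n): if i+j==n: break; res[j][j+i]=num; num+=1'
def pvEvenLoop (n i : Int) : List Int → List (List Int) → Int → List (List Int) × Int
  | [], res, num => (res, num)
  | j :: js, res, num =>
    if i + j = n then (res, num)
    else pvEvenLoop n i js (pvSet2 res j (j + i) num) (num + 1)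

-- 'for k in range(n): if i+k==n: break; res[k][k+i]=num; num-=1'
def pvOddLoop (n i : Int) : List Int → List (List Int) → Int → List (List Int) × Int
  | [], res, num => (res, num)
  | k :: ks, res, num =>
    if i + k = n then (res, num)
    else pvOddLoop n i ks (pvSet2 res k (k + i) num) (num - 1)

-- one iteration of the outer 'for i in range(n)' on the state (res, num, df)
def pvStep (n : Int) (st : List (List Int) × Int × Int) (i : Int) : List (List Int) × Int × Int :=
  let res := st.1
  let num := st.2.1
  let df := st.2.2
  if PySem.Int.mod i 2 = 0 then
    let p := pvEvenLoop n i (PySem.List.pyRange 0 n 1) res num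
    (p.1, p.2, df)
  else
    let num1 := num + df
    let temp := num1 + 1
    let p := pvOddLoop n i (PySem.List.pyRange 0 n 1) res num1
    (p.1, temp, df - 2)

def pattern6 (n : Int) : List (List Int) :=
  let res := (PySem.List.pyRange 0 n 1).map (fun _ => List.replicate n.toNat (0 : Int))
  ((PySem.List.pyRange 0 n 1).foldl (pvStep n) (res, 1, n - 2)).1

-- ===== PORT B =====
def pvVal (n r c : Int) : Int :=
  let i := c - r
  let base := i * n - PySem.Int.floordiv (i * (i - 1)) 2
  let pos := if PySem.Int.mod i 2 = 0 then r else n - i - 1 - r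
  base + pos + 1

def pattern6_alt (n : Int) : List (List Int) :=
  (PySem.List.pyRange 0 n 1).map (fun r =>
    (PySem.List.pyRange 0 n 1).map (fun c =>
      if c ≥ r then pvVal n r c else 0))

-- ===== PRECONDITION & SPEC =====
def Spec_pattern6 (n : Int) (out : List (List Int)) : Prop := out = pattern6_alt n
instance (n : Int) (out : List (List Int)) : Decidable (Spec_pattern6 n out) := by unfold Spec_pattern6; infer_instance

-- ===== CLAIM (what is proved, stated in full; the proofs are below) =====
def Claim_equal_pattern6 : Prop := ∀ (n : Int), Dom_pattern6 n → Spec_pattern6 n (pattern6 n)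

-- ===== LEMMAS AND PROOFS =====

-- counter base: number of cells on diagonals 0..i-1 (with n = m)
def pvBsum (m : Nat) : Nat → Int
  | 0 => 0
  | i + 1 => pvBsum m i + ((m : Int) - i)

-- value A writes on diagonal i, row r
def pvV (m i r : Nat) : Int :=
  if i % 2 = 0 then pvBsum m i + r + 1 else pvBsum m (i + 1) - r

-- matrix state: diagonals < i full, rows < j of diagonal i written
def pvMp (m i j : Nat) : List (List Int) :=
  (List.range m).map (fun r =>
    (List.range m).map (fun c =>
      if r ≤ c ∧ (c - r < i ∨ (c - r = i ∧ r < j)) then pvV m (c - r) r else 0))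

lemma pvTri (i : Nat) : (i + 1) * i / 2 = i * (i - 1) / 2 + i := by
  rcases i with _ | j
  · rfl
  · have h1 : (j + 1 + 1) * (j + 1) = (j + 1) * j + 2 * (j + 1) := by ring
    obtain ⟨k, hk⟩ := Nat.even_mul_succ_self j
    have hk' : (j + 1) * j = k + k := by rw [Nat.mul_comm]; exact hk
    rw [show (j + 1) * (j + 1 - 1) = (j + 1) * j by rfl]
    omega

lemma pvBsum_closed (m : Nat) (i : Nat) :
    pvBsum m i = (i : Int) * m - (i * (i - 1) / 2 : Nat) := by
  induction i with
  | zero => simp [pvBsum]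
  | succ i ih =>
      simp only [pvBsum, ih]
      rw [show (i + 1) * ((i + 1) - 1) = (i + 1) * i from rfl, pvTri i]
      push_cast
      ring

lemma pvVal_eq_pvV (m : Nat) (r c : Nat) (hrc : r ≤ c) :
    pvVal (m : Int) (r : Int) (c : Int) = pvV m (c - r) r := by
  set i : Nat := c - r with hi
  have hci : (c : Int) - r = (i : Int) := by omega
  have hfd : PySem.Int.floordiv ((i : Int) * ((i : Int) - 1)) 2 = ((i * (i - 1) / 2 : Nat) : Int) := by
    rcases i with _ | i'
    · decide
    · have h : ((i' + 1 : Nat) : Int) * (((i' + 1 : Nat) : Int) - 1) = (((i' + 1) * i' : Nat) : Int) := by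
        push_cast; ring
      have h2 : PySem.Int.floordiv (((i' + 1) * i' : Nat) : Int) 2 = (((i' + 1) * i' / 2 : Nat) : Int) :=
        PySem.Int.floordiv_natCast ((i' + 1) * i') 2
      rw [h, h2]
      norm_num
  have hmod : PySem.Int.mod (i : Int) 2 = ((i % 2 : Nat) : Int) := PySem.Int.mod_natCast i 2
  simp only [pvVal, pvV, hci, hfd, hmod, pvBsum_closed]
  by_cases hp : i % 2 = 0
  · simp [hp]
  · have hne : ¬ ((i % 2 : Nat) : Int) = 0 := by omega
    rw [if_neg hne, if_neg hp]
    rw [show (i + 1) * ((i + 1) - 1) = (i + 1) * i from rfl, pvTri i]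
    push_cast
    ring

-- one write of A on the partial matrix
lemma pvSet2_Mp (m i j : Nat) (hij : i + j < m) :
    pvSet2 (pvMp m i j) (j : Int) ((j : Int) + i) (pvV m i j) = pvMp m i (j + 1) := by
  have hj : j < m := by omega
  have hji : ((j : Int) + i) = ((j + i : Nat) : Int) := by push_cast; ring
  simp only [pvSet2, pvMp, hji, PySem.List.pySetD_natCast, PySem.List.pyGetD_natCast]
  apply List.ext_getElem
  · simp
  intro r h1 h2
  simp only [List.length_set, List.length_map, List.length_range] at h1
  simp only [List.getElem_set, List.getElem_map, List.getElem_range]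
  by_cases hrj : j = r
  · subst hrj
    rw [if_pos rfl]
    rw [List.getD_eq_getElem _ _ (by simpa using hj)]
    simp only [List.getElem_map, List.getElem_range]
    apply List.ext_getElem
    · simp
    intro c hc1 hc2
    simp only [List.length_set, List.length_map, List.length_range] at hc1
    simp only [List.getElem_set, List.getElem_map, List.getElem_range]
    by_cases hcd : j + i = c
    · rw [if_pos hcd]
      rw [if_pos (by omega : j ≤ c ∧ (c - j < i ∨ (c - j = i ∧ j < j + 1)))]
      congr 1
      omega
    · rw [if_neg hcd]
      by_cases hcond : j ≤ c ∧ (c - j < i ∨ (c - j = i ∧ j < j))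
      · rw [if_pos hcond, if_pos (by omega : j ≤ c ∧ (c - j < i ∨ (c - j = i ∧ j < j + 1)))]
      · rw [if_neg hcond, if_neg (by omega : ¬ (j ≤ c ∧ (c - j < i ∨ (c - j = i ∧ j < j + 1))))]
  · rw [if_neg hrj]
    apply List.map_congr_left
    intro c hc
    have hcm : c < m := List.mem_range.mp hc
    by_cases hcond : r ≤ c ∧ (c - r < i ∨ (c - r = i ∧ r < j))
    · rw [if_pos hcond, if_pos (by omega : r ≤ c ∧ (c - r < i ∨ (c - r = i ∧ r < j + 1)))]
    · rw [if_neg hcond, if_neg (by omega : ¬ (r ≤ c ∧ (c - r < i ∨ (c - r = i ∧ r < j + 1))))]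

-- finishing a diagonal advances the state
lemma pvMp_full_step (m i : Nat) (hi : i ≤ m) :
    pvMp m i (m - i) = pvMp m (i + 1) 0 := by
  unfold pvMp
  apply List.map_congr_left
  intro r hr
  have hrm : r < m := List.mem_range.mp hr
  apply List.map_congr_left
  intro c hc
  have hcm : c < m := List.mem_range.mp hc
  by_cases hcond : r ≤ c ∧ (c - r < i ∨ (c - r = i ∧ r < m - i))
  · rw [if_pos hcond, if_pos (by omega : r ≤ c ∧ (c - r < i + 1 ∨ (c - r = i + 1 ∧ r < 0)))]
  · rw [if_neg hcond, if_neg (by omega : ¬ (r ≤ c ∧ (c - r < i + 1 ∨ (c - r = i + 1 ∧ r < 0))))]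

lemma pvEvenLoop_spec (m i : Nat) (hi : i < m) (hpar : i % 2 = 0) :
    ∀ j0, j0 ≤ m - i →
    pvEvenLoop (m : Int) (i : Int) ((List.range' j0 (m - j0)).map (Nat.cast))
      (pvMp m i j0) (pvBsum m i + j0 + 1)
    = (pvMp m i (m - i), pvBsum m i + ((m - i : Nat) : Int) + 1) := by
  intro j0 hj0
  induction hlen : m - i - j0 generalizing j0 with
  | zero =>
      have hje : j0 = m - i := by omega
      subst hje
      rcases Nat.eq_zero_or_pos (m - (m - i)) with hz | hpos
      · rw [hz]
        simp [pvEvenLoop]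
      · obtain ⟨len, hlen'⟩ : ∃ len, m - (m - i) = len + 1 := ⟨m - (m - i) - 1, by omega⟩
        rw [hlen', List.range'_succ, List.map_cons]
        simp only [pvEvenLoop]
        rw [if_pos (by omega : (i : Int) + ((m - i : Nat) : Int) = (m : Int))]
  | succ len ih =>
      have hlt : j0 < m - i := by omega
      obtain ⟨len', hlen'⟩ : ∃ len', m - j0 = len' + 1 := ⟨m - j0 - 1, by omega⟩
      rw [hlen', List.range'_succ, List.map_cons]
      simp only [pvEvenLoop]
      rw [if_neg (by omega : ¬ ((i : Int) + (j0 : Int) = (m : Int)))]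
      have hval : pvBsum m i + (j0 : Int) + 1 = pvV m i j0 := by
        simp [pvV, hpar]
      rw [hval, pvSet2_Mp m i j0 (by omega)]
      have hnum : pvV m i j0 + 1 = pvBsum m i + ((j0 + 1 : Nat) : Int) + 1 := by
        rw [pvV, if_pos hpar]
        push_cast [Nat.cast_add]
        ring
      rw [hnum, show len' = m - (j0 + 1) by omega]
      exact ih (j0 + 1) (by omega) (by omega)

lemma pvOddLoop_spec (m i : Nat) (hi : i < m) (hpar : i % 2 = 1) :
    ∀ j0, j0 ≤ m - i →
    pvOddLoop (m : Int) (i : Int) ((List.range' j0 (m - j0)).map (Nat.cast))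
      (pvMp m i j0) (pvBsum m (i + 1) - j0)
    = (pvMp m i (m - i), pvBsum m (i + 1) - ((m - i : Nat) : Int)) := by
  intro j0 hj0
  induction hlen : m - i - j0 generalizing j0 with
  | zero =>
      have hje : j0 = m - i := by omega
      subst hje
      rcases Nat.eq_zero_or_pos (m - (m - i)) with hz | hpos
      · rw [hz]
        simp [pvOddLoop]
      · obtain ⟨len, hlen'⟩ : ∃ len, m - (m - i) = len + 1 := ⟨m - (m - i) - 1, by omega⟩
        rw [hlen', List.range'_succ, List.map_cons]
        simp only [pvOddLoop]
        rw [if_pos (by omega : (i : Int) + ((m - i : Nat) : Int) = (m : Int))]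
  | succ len ih =>
      have hlt : j0 < m - i := by omega
      obtain ⟨len', hlen'⟩ : ∃ len', m - j0 = len' + 1 := ⟨m - j0 - 1, by omega⟩
      rw [hlen', List.range'_succ, List.map_cons]
      simp only [pvOddLoop]
      rw [if_neg (by omega : ¬ ((i : Int) + (j0 : Int) = (m : Int)))]
      have hval : pvBsum m (i + 1) - (j0 : Int) = pvV m i j0 := by
        rw [pvV, if_neg (by omega : ¬ i % 2 = 0)]
      rw [hval, pvSet2_Mp m i j0 (by omega)]
      have hnum : pvV m i j0 - 1 = pvBsum m (i + 1) - ((j0 + 1 : Nat) : Int) := by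
        rw [pvV, if_neg (by omega : ¬ i % 2 = 0)]
        push_cast
        ring
      rw [hnum, show len' = m - (j0 + 1) by omega]
      exact ih (j0 + 1) (by omega) (by omega)

lemma pvRange_cast (m : Nat) :
    PySem.List.pyRange 0 (m : Int) 1 = (List.range' 0 m).map (Nat.cast) := by
  rw [PySem.List.pyRange_one]
  simp [List.range_eq_range']

lemma pvStep_spec (m i0 : Nat) (hlt : i0 < m) :
    pvStep (m : Int)
      (pvMp m i0 0, pvBsum m i0 + 1, (m : Int) - 2 - 2 * ((i0 / 2 : Nat) : Int)) (i0 : Int)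
    = (pvMp m (i0 + 1) 0, pvBsum m (i0 + 1) + 1,
       (m : Int) - 2 - 2 * (((i0 + 1) / 2 : Nat) : Int)) := by
  have hcast : PySem.Int.mod (i0 : Int) 2 = ((i0 % 2 : Nat) : Int) := PySem.Int.mod_natCast i0 2
  by_cases hpar : i0 % 2 = 0
  · have hmod : PySem.Int.mod (i0 : Int) 2 = 0 := by
      rw [hcast, hpar]
      norm_num
    have hspec := pvEvenLoop_spec m i0 hlt hpar 0 (by omega)
    simp only [Nat.cast_zero, add_zero, Nat.sub_zero] at hspec
    simp only [pvStep, pvRange_cast]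
    rw [if_pos hmod, hspec, pvMp_full_step m i0 hlt.le,
      show (i0 + 1) / 2 = i0 / 2 from by omega]
    have hb : pvBsum m i0 + ((m - i0 : Nat) : Int) + 1 = pvBsum m (i0 + 1) + 1 := by
      simp only [pvBsum]
      omega
    rw [hb]
  · have hpar1 : i0 % 2 = 1 := by omega
    have hmod : ¬ PySem.Int.mod (i0 : Int) 2 = 0 := by
      rw [hcast, hpar1]
      norm_num
    have hspec := pvOddLoop_spec m i0 hlt hpar1 0 (by omega)
    simp only [Nat.cast_zero, sub_zero, Nat.sub_zero] at hspec
    simp only [pvStep, pvRange_cast]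
    have hdf : pvBsum m i0 + 1 + ((m : Int) - 2 - 2 * ((i0 / 2 : Nat) : Int)) = pvBsum m (i0 + 1) := by
      simp only [pvBsum]
      omega
    rw [if_neg hmod, hdf, hspec, pvMp_full_step m i0 hlt.le,
      show (i0 + 1) / 2 = i0 / 2 + 1 from by omega,
      show ((m : Int) - 2 - 2 * ((i0 / 2 : Nat) : Int) - 2)
        = (m : Int) - 2 - 2 * ((i0 / 2 + 1 : Nat) : Int) from by push_cast; ring]

-- invariant for the outer loop over diagonals
lemma pvOuter_spec (m : Nat) : ∀ i0, i0 ≤ m →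
    ((List.range' i0 (m - i0)).map (Nat.cast)).foldl (pvStep (m : Int))
      (pvMp m i0 0, pvBsum m i0 + 1, (m : Int) - 2 - 2 * ((i0 / 2 : Nat) : Int))
    = (pvMp m m 0, pvBsum m m + 1, (m : Int) - 2 - 2 * ((m / 2 : Nat) : Int)) := by
  intro i0 hi0
  induction hlen : m - i0 generalizing i0 with
  | zero =>
      have : i0 = m := by omega
      subst this
      simp
  | succ len ih =>
      have hlt : i0 < m := by omega
      rw [List.range'_succ, List.map_cons, List.foldl_cons]
      rw [pvStep_spec m i0 hlt]
      exact ih (i0 + 1) (by omega) (by omega)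

lemma pattern6_alt_eq_Mp (m : Nat) : pattern6_alt (m : Int) = pvMp m m 0 := by
  unfold pattern6_alt pvMp
  rw [PySem.List.pyRange_one]
  simp only [Int.sub_zero, Int.toNat_natCast, List.map_map]
  apply List.map_congr_left
  intro r hr
  have hrm : r < m := List.mem_range.mp hr
  apply List.map_congr_left
  intro c hc
  have hcm : c < m := List.mem_range.mp hc
  simp only [Function.comp, zero_add]
  by_cases hrc : r ≤ c
  · rw [if_pos (by exact_mod_cast hrc : ((c : Int) ≥ (r : Int))),
      if_pos (by omega : r ≤ c ∧ (c - r < m ∨ (c - r = m ∧ r < 0)))]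
    exact pvVal_eq_pvV m r c hrc
  · rw [if_neg (by exact_mod_cast hrc : ¬ ((c : Int) ≥ (r : Int))),
      if_neg (by omega : ¬ (r ≤ c ∧ (c - r < m ∨ (c - r = m ∧ r < 0))))]

lemma pattern6_eq_Mp (m : Nat) : pattern6 (m : Int) = pvMp m m 0 := by
  have hinit : (PySem.List.pyRange 0 (m : Int) 1).map (fun _ => List.replicate (Int.toNat (m : Int)) (0 : Int))
      = pvMp m 0 0 := by
    unfold pvMp
    rw [PySem.List.pyRange_one]
    simp only [Int.sub_zero, Int.toNat_natCast, List.map_map]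
    apply List.map_congr_left
    intro r hr
    rw [show (fun c => if r ≤ c ∧ (c - r < 0 ∨ (c - r = 0 ∧ r < 0)) then pvV m (c - r) r else (0 : Int))
        = (fun _ => (0 : Int)) from funext (fun c => by rw [if_neg (by omega)])]
    simp
  simp only [pattern6]
  rw [hinit, pvRange_cast]
  have h0 : (pvMp m 0 0, (1 : Int), (m : Int) - 2)
      = (pvMp m 0 0, pvBsum m 0 + 1, (m : Int) - 2 - 2 * ((0 / 2 : Nat) : Int)) := by
    simp [pvBsum]
  rw [h0, show (List.range' 0 m) = (List.range' 0 (m - 0)) by rw [Nat.sub_zero],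
    pvOuter_spec m 0 (by omega)]

-- ===== VERDICT (by name: the statement is the Claim_ definition above) =====
theorem pattern6_spec : Claim_equal_pattern6 := by
  unfold Claim_equal_pattern6
  intro n _
  unfold Spec_pattern6
  by_cases hn : n ≤ 0
  · have h1 : PySem.List.pyRange 0 n 1 = [] := by
      rw [PySem.List.pyRange_one, show (n - 0).toNat = 0 from by omega]
      rfl
    unfold pattern6 pattern6_alt
    simp [h1]
  · obtain ⟨m, rfl⟩ : ∃ m : Nat, n = (m : Int) := ⟨n.toNat, by omega⟩
    rw [pattern6_eq_Mp, pattern6_alt_eq_Mp]
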